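-- pv_equiv track=rewrite | github.com/meghana998/MissionRND2019-ProfessionalPythonCourse | unit2_assignment_01.py | find
-- ===== SOURCE A (Python) =====
-- def find(words):
--     res=[]
--     count=0
--     for i in words:
--          count=0
--          for k in i:
--           for j in  "aeiou":
--             if k==j:
--                 count=count+1
--          res.append(count)
--     return res
-- ===== SOURCE B (Python) =====
-- def find(words):
--     res = []
--     for word in words:
--         freq = {}
--         for ch in word:
--             freq[ch] = freq.get(ch, 0) + 1
--         res.append(sum(freq.get(v, 0) for v in "aeiou"))
--     return res
-- ===== Notes on version B (the rewrite author's own statement) =====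
-- stated objective: idiomatic
-- what changed: B builds a per-word character-frequency table in one pass and sums the table's entries for the five vowels, instead of A's inner scan of every character against the vowel string.
import Mathlib
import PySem

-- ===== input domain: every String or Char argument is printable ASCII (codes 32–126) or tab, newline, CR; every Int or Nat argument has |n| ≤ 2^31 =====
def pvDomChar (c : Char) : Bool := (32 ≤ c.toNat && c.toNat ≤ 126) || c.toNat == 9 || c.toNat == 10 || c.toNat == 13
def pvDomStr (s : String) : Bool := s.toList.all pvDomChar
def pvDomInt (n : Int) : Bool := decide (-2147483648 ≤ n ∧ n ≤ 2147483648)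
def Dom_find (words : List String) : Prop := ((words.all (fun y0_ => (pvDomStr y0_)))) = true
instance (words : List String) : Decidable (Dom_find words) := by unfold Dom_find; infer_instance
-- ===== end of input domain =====

-- B counts vowels per word via a one-pass character-frequency dict then sums the five vowel entries (idiomatic); return values are proved equal on all inputs.

-- ===== PORT A =====
-- A: for each word, for each char, scan the vowel string and bump count on a match; append count.
def find (words : List String) : List Int :=
  (words.foldl (fun (st : List Int × Int) i =>
      let count :=
        i.toList.foldl (fun count k =>
          "aeiou".toList.foldl (fun count j => if k == j then count + 1 else count) count) 0
      (st.1 ++ [count], count))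
    ([], 0)).1

-- ===== PORT B =====
-- B: freq = one-pass character counter of the word; append the sum of freq.get(v, 0) over "aeiou".
def find_alt (words : List String) : List Int :=
  words.foldl (fun res word =>
      let freq : PySem.Dict Char Int :=
        word.toList.foldl (fun freq ch => freq.modify ch 0 (· + 1)) PySem.Dict.empty
      res ++ ["aeiou".toList.foldl (fun s v => s + freq.getD v 0) 0])
    []

-- ===== PRECONDITION & SPEC =====
def Spec_find (words : List String) (out : List Int) : Prop := out = find_alt words
instance (words : List String) (out : List Int) : Decidable (Spec_find words out) := by unfold Spec_find; infer_instance

-- ===== CLAIM (what is proved, stated in full; the proofs are below) =====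
def Claim_equal_find : Prop := ∀ (words : List String), Dom_find words → Spec_find words (find words)

-- ===== LEMMAS AND PROOFS =====

-- per-word score as computed by A
def scoreA (l : List Char) : Int :=
  l.foldl (fun count k =>
    "aeiou".toList.foldl (fun count j => if k == j then count + 1 else count) count) 0

-- per-word score as computed by B
def scoreB (l : List Char) : Int :=
  "aeiou".toList.foldl (fun s v => s + ((PySem.Dict.counter l).getD v 0)) 0

theorem scoreB_eq_sum (l : List Char) :
    scoreB l = ("aeiou".toList.map (fun v => (l.count v : Int))).sum := by
  simp [scoreB, PySem.Dict.getD_counter]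
  omega

theorem scoreA_aux (l : List Char) (a : Int) :
    l.foldl (fun count k =>
      "aeiou".toList.foldl (fun count j => if k == j then count + 1 else count) count) a
      = a + (l.map (fun k => ("aeiou".toList.countP (fun j => k == j) : Int))).sum := by
  induction l generalizing a with
  | nil => simp
  | cons c t ih =>
      rw [List.foldl_cons, ih,
        PySem.List.foldl_if_add_one (fun j => c == j) "aeiou".toList a]
      simp
      omega

theorem sum_swap (l : List Char) :
    (l.map (fun k => ("aeiou".toList.countP (fun j => k == j) : Int))).sum
      = ("aeiou".toList.map (fun v => (l.count v : Int))).sum := by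
  induction l with
  | nil => simp
  | cons c t ih =>
      simp only [List.map_cons, List.sum_cons, List.count_cons]
      rw [ih]
      simp [List.countP, List.countP.go, Bool.cond_eq_ite, beq_iff_eq]
      split_ifs <;> omega

theorem score_eq (l : List Char) : scoreA l = scoreB l := by
  rw [scoreA, scoreA_aux, scoreB_eq_sum, sum_swap, zero_add]

theorem find_fold (words : List String) (res : List Int) (c : Int) :
    (words.foldl (fun (st : List Int × Int) i =>
        (st.1 ++ [scoreA i.toList], scoreA i.toList)) (res, c)).1
      = res ++ words.map (fun w => scoreA w.toList) := by
  induction words generalizing res c with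
  | nil => simp
  | cons w t ih => simp [ih]

theorem alt_fold (words : List String) (res : List Int) :
    words.foldl (fun res word => res ++ [scoreB word.toList]) res
      = res ++ words.map (fun w => scoreB w.toList) := by
  induction words generalizing res with
  | nil => simp
  | cons w t ih => simp [ih]

theorem find_spec : Claim_equal_find := by
  intro words _
  show (words.foldl (fun (st : List Int × Int) i =>
          (st.1 ++ [scoreA i.toList], scoreA i.toList)) ([], 0)).1
      = words.foldl (fun res word => res ++ [scoreB word.toList]) []
  rw [find_fold words [] 0, alt_fold words []]
  simp only [List.nil_append]
  exact List.map_congr_left (fun w _ => score_eq w.toList)
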